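-- pv_equiv track=rewrite | github.com/Hmzbo/Rap-Bot-2 | TT2_FakeYou.py | ARPA
-- ===== SOURCE A (Python) =====
-- def ARPA(text, thisdict, punctuation=r"!?,.;", EOS_Token=True):
--     out = ''
--     for word_ in text.split(" "):
--         word=word_; end_chars = ''
--         while any(elem in word for elem in punctuation) and len(word) > 1:
--             if word[-1] in punctuation: end_chars = word[-1] + end_chars; word = word[:-1]
--             else: break
--         try:
--             word_arpa = thisdict[word.upper()]
--             word = "{" + str(word_arpa) + "}"
--         except KeyError: pass
--         out = (out + " " + word + end_chars).strip()
--     if EOS_Token and out[-1] != ";": out += ";"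
--     return out
-- ===== SOURCE B (Python) =====
-- def ARPA(text, thisdict, punctuation=r"!?,.;", EOS_Token=True):
--     pset = set(punctuation)
--     pieces = []
--     for word in text.split(" "):
--         i = len(word)
--         while i > 1 and word[i - 1] in pset:
--             i -= 1
--         stem, end = word[:i], word[i:]
--         arpa = thisdict.get(stem.upper())
--         if arpa is not None:
--             stem = "{" + str(arpa) + "}"
--         pieces.append(stem + end)
--     out = ""
--     for p in pieces:
--         p = p.rstrip() if out else p.strip()
--         if p:
--             out = out + " " + p if out else p
--     if EOS_Token and out[-1] != ";":
--         out += ";"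
--     return out
-- ===== Notes on version B (the rewrite author's own statement) =====
-- stated objective: alternative
-- what changed: The rebuild-the-string peel loop (repeated any(elem in word) scans plus word[:-1] copies) is replaced by an index-only scan from the end over a punctuation set, slicing once; the per-iteration (out+' '+word).strip() accumulation (quadratic re-copying of out) is replaced by a two-phase pieces list joined with a single strip/rstrip fold; try/except KeyError becomes dict.get.
import Mathlib
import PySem

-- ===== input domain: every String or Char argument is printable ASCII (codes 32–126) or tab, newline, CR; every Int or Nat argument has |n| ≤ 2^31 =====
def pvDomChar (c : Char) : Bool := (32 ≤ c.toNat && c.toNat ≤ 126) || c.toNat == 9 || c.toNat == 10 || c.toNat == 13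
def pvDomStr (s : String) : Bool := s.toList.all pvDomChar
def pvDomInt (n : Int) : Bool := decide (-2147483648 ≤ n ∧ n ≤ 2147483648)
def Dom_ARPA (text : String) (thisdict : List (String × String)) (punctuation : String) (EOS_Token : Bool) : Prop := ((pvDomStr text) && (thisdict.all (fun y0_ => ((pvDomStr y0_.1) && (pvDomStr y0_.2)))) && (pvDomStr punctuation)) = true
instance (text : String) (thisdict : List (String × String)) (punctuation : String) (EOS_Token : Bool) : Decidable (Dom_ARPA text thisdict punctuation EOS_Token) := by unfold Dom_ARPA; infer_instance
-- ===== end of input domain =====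

-- B replaces A's rebuild-the-string peel loop by an index scan over a punctuation set and
-- A's per-iteration strip() accumulation by a two-phase pieces list folded with strip/rstrip
-- once (objective: alternative; same results, proved below on Pre_).

-- ===== PORT A =====
-- while any(elem in word for elem in punctuation) and len(word) > 1: …
def pvPeelA (punct : List Char) (word endChars : List Char) : List Char × List Char :=
  if h : (punct.any (fun e => PySem.Chars.isIn [e] word)) = true ∧ 1 < word.length then
    -- if word[-1] in punctuation: end_chars = word[-1] + end_chars; word = word[:-1]  else: break
    if PySem.Chars.isIn [PySem.List.pyGetD word (-1) ' '] punct then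
      pvPeelA punct word.dropLast (PySem.List.pyGetD word (-1) ' ' :: endChars)
    else (word, endChars)
  else (word, endChars)
  termination_by word.length
  decreasing_by simp [List.length_dropLast]; omega

def ARPA (text : String) (thisdict : List (String × String)) (punctuation : String) (EOS_Token : Bool) : String :=
  let dict := PySem.Dict.mk thisdict
  let out : List Char :=
    (PySem.Chars.splitOn text.toList [' ']).foldl (fun out word_ =>
      let pe := pvPeelA punctuation.toList word_ []
      -- try: word = "{" + str(thisdict[word.upper()]) + "}"  except KeyError: pass
      let word := match dict.get? (String.mk (PySem.Chars.upper pe.1)) with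
        | some v => '{' :: v.toList ++ ['}']
        | none => pe.1
      -- out = (out + " " + word + end_chars).strip()
      PySem.Chars.strip (out ++ ' ' :: (word ++ pe.2))) []
  -- if EOS_Token and out[-1] != ";": out += ";"   (out[-1] raises on empty out: see Pre_ARPA)
  let out := if EOS_Token && (PySem.List.pyGetD out (-1) ';' != ';') then out ++ [';'] else out
  String.mk out

-- ===== PORT B =====
-- while i > 1 and word[i-1] in pset: i -= 1
def pvStripIdxB (pset : PySem.Set Char) (word : List Char) (i : Nat) : Nat :=
  if h : 1 < i ∧ (PySem.Set.contains pset (word.getD (i - 1) ' ')) = true then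
    pvStripIdxB pset word (i - 1)
  else i
  termination_by i
  decreasing_by omega

def pvPieceB (dict : PySem.Dict String String) (pset : PySem.Set Char) (word : List Char) : List Char :=
  let i := pvStripIdxB pset word word.length
  let stem := word.take i      -- word[:i]
  let ends := word.drop i      -- word[i:]
  let stem := match dict.get? (String.mk (PySem.Chars.upper stem)) with
    | some v => '{' :: v.toList ++ ['}']
    | none => stem
  stem ++ ends

-- p = p.rstrip() if out else p.strip(); if p: out = out + " " + p if out else p
def pvCombineB (out p : List Char) : List Char :=
  let p2 := if out = [] then PySem.Chars.strip p else PySem.Chars.rstrip p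
  if p2 = [] then out else if out = [] then p2 else out ++ ' ' :: p2

def ARPA_alt (text : String) (thisdict : List (String × String)) (punctuation : String) (EOS_Token : Bool) : String :=
  let dict := PySem.Dict.mk thisdict
  let pset := PySem.Set.ofList punctuation.toList
  let pieces := (PySem.Chars.splitOn text.toList [' ']).map (pvPieceB dict pset)
  let out := pieces.foldl pvCombineB []
  if EOS_Token && (PySem.List.pyGetD out (-1) ';' != ';') then String.mk (out ++ [';'])
  else String.mk out

-- ===== PRECONDITION & SPEC =====
-- pvStem describes the input shape Pre_ needs: a token with its contiguous trailing
-- punctuation-class characters removed, always keeping at least the first character.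
def pvStem (punct : List Char) (w : List Char) : List Char :=
  if w = [] then [] else w.take (max 1 (w.length - (w.reverse.takeWhile (fun c => decide (c ∈ punct))).length))

-- Pre_ excludes exactly the inputs where A raises IndexError at the final out[-1]:
-- EOS_Token = true and every space-separated token is all-whitespace with its
-- trailing-punctuation-stripped stem absent from thisdict, so out is still '' there
-- (B raises the same IndexError on those inputs).
def Pre_ARPA (text : String) (thisdict : List (String × String)) (punctuation : String) (EOS_Token : Bool) : Prop :=
  EOS_Token = true →
    ((PySem.Chars.splitOn text.toList [' ']).any (fun w =>
      w.any (fun c => !PySem.Chars.isspace c) ||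
      ((PySem.Dict.mk thisdict).get? (String.mk (PySem.Chars.upper (pvStem punctuation.toList w)))).isSome)) = true
instance (text : String) (thisdict : List (String × String)) (punctuation : String) (EOS_Token : Bool) : Decidable (Pre_ARPA text thisdict punctuation EOS_Token) := by unfold Pre_ARPA; infer_instance

def pvWitness_ARPA : String × (List (String × String)) × String × Bool :=
  ("hello, world!", [("HELLO", "HH AH L OW"), ("WORLD", "W ER L D")], "!?,.;", true)

def Spec_ARPA (text : String) (thisdict : List (String × String)) (punctuation : String) (EOS_Token : Bool) (out : String) : Prop := out = ARPA_alt text thisdict punctuation EOS_Token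
instance (text : String) (thisdict : List (String × String)) (punctuation : String) (EOS_Token : Bool) (out : String) : Decidable (Spec_ARPA text thisdict punctuation EOS_Token out) := by unfold Spec_ARPA; infer_instance

-- ===== CLAIM (what is proved, stated in full; the proofs are below) =====
def Claim_equal_ARPA : Prop := ∀ (text : String) (thisdict : List (String × String)) (punctuation : String) (EOS_Token : Bool), Dom_ARPA text thisdict punctuation EOS_Token → Pre_ARPA text thisdict punctuation EOS_Token → Spec_ARPA text thisdict punctuation EOS_Token (ARPA text thisdict punctuation EOS_Token)

-- ===== LEMMAS AND PROOFS =====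

theorem pv_isIn_singleton (c : Char) (l : List Char) :
    PySem.Chars.isIn [c] l = true ↔ c ∈ l := by
  rw [PySem.Chars.isIn_iff_infix]
  constructor
  · intro h; exact h.subset (List.mem_singleton_self c)
  · intro h
    obtain ⟨s, t, rfl⟩ := List.append_of_mem h
    exact ⟨s, t, by simp⟩

theorem pvStripIdxB_le (pset : PySem.Set Char) (w : List Char) (i : Nat) :
    pvStripIdxB pset w i ≤ i := by
  fun_induction pvStripIdxB <;> omega

theorem pvStripIdxB_dropLast (pset : PySem.Set Char) (w : List Char) (i : Nat)
    (h : i + 1 ≤ w.length) : pvStripIdxB pset w i = pvStripIdxB pset w.dropLast i := by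
  induction i using Nat.strong_induction_on with
  | _ i ih =>
    conv_lhs => rw [pvStripIdxB]
    conv_rhs => rw [pvStripIdxB]
    by_cases h1 : 1 < i
    · have hget : w.dropLast.getD (i - 1) ' ' = w.getD (i - 1) ' ' := by
        rw [List.getD_eq_getElem?_getD, List.getD_eq_getElem?_getD, List.getElem?_dropLast,
          if_pos (by omega)]
      rw [hget]
      split_ifs with h2
      · exact ih (i - 1) (by omega) (by omega)
      · rfl
    · rw [dif_neg (by omega), dif_neg (by omega)]

theorem pvPeelA_eq (punct : List Char) (w e : List Char) :
    pvPeelA punct w e =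
      (w.take (pvStripIdxB (PySem.Set.ofList punct) w w.length),
       w.drop (pvStripIdxB (PySem.Set.ofList punct) w w.length) ++ e) := by
  fun_induction pvPeelA with
  | case1 word endChars h hlast ih =>
    have hne : word ≠ [] := by intro hn; rw [hn] at h; simp at h
    have hlastc : PySem.List.pyGetD word (-1) ' ' = word.getLast hne :=
      PySem.List.pyGetD_neg_one word ' ' hne
    have hmem : word.getLast hne ∈ punct := by
      rw [← pv_isIn_singleton, ← hlastc]; exact hlast
    have hj : pvStripIdxB (PySem.Set.ofList punct) word word.length
        = pvStripIdxB (PySem.Set.ofList punct) word.dropLast word.dropLast.length := by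
      have hstep : pvStripIdxB (PySem.Set.ofList punct) word word.length
          = pvStripIdxB (PySem.Set.ofList punct) word (word.length - 1) := by
        conv_lhs => rw [pvStripIdxB]
        rw [dif_pos ⟨h.2, by
          rw [List.getD_eq_getElem?_getD,
            List.getElem?_eq_getElem (by omega : word.length - 1 < word.length)]
          simp only [Option.getD_some]
          rw [PySem.Set.contains_iff, PySem.Set.mem_ofList, ← List.getLast_eq_getElem hne]
          exact hmem⟩]
      rw [hstep, List.length_dropLast]
      exact pvStripIdxB_dropLast _ _ _ (by omega)
    rw [ih, hj]
    set j := pvStripIdxB (PySem.Set.ofList punct) word.dropLast word.dropLast.length with hjdef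
    have hjle : j ≤ word.dropLast.length := pvStripIdxB_le _ _ _
    rw [Prod.mk.injEq]
    constructor
    · rw [List.dropLast_eq_take, List.take_take]
      congr 1
      simp only [List.length_dropLast] at hjle
      omega
    · have hdrop : List.drop j word = List.drop j word.dropLast ++ [word.getLast hne] := by
        conv_lhs => rw [← List.dropLast_append_getLast hne]
        rw [List.drop_append_of_le_length hjle]
      rw [hdrop, hlastc]
      simp
  | case2 word endChars h hlast =>
    have hne : word ≠ [] := by intro hn; rw [hn] at h; simp at h
    have hlastc : PySem.List.pyGetD word (-1) ' ' = word.getLast hne :=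
      PySem.List.pyGetD_neg_one word ' ' hne
    have hnm : word.getLast hne ∉ punct := by
      intro hm; apply hlast; rw [hlastc, pv_isIn_singleton]; exact hm
    have hj : pvStripIdxB (PySem.Set.ofList punct) word word.length = word.length := by
      conv_lhs => rw [pvStripIdxB]
      rw [dif_neg]
      rintro ⟨h1, h2⟩
      apply hnm
      rw [List.getD_eq_getElem?_getD,
        List.getElem?_eq_getElem (by omega : word.length - 1 < word.length)] at h2
      simp only [Option.getD_some] at h2
      rw [PySem.Set.contains_iff, PySem.Set.mem_ofList, ← List.getLast_eq_getElem hne] at h2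
      exact h2
    rw [hj]
    simp
  | case3 word endChars h =>
    have hj : pvStripIdxB (PySem.Set.ofList punct) word word.length = word.length := by
      conv_lhs => rw [pvStripIdxB]
      rw [dif_neg]
      rintro ⟨h1, h2⟩
      have hne : word ≠ [] := by intro hn; rw [hn] at h1; simp at h1
      apply h
      constructor
      · rw [List.getD_eq_getElem?_getD,
          List.getElem?_eq_getElem (by omega : word.length - 1 < word.length)] at h2
        simp only [Option.getD_some] at h2
        rw [PySem.Set.contains_iff, PySem.Set.mem_ofList] at h2
        rw [List.any_eq_true]
        refine ⟨word[word.length - 1], h2, ?_⟩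
        rw [pv_isIn_singleton]
        exact List.getElem_mem _
      · exact h1
    rw [hj]
    simp

theorem pv_rstrip_append (a b : List Char) :
    PySem.Chars.rstrip (a ++ b) =
      if PySem.Chars.rstrip b = [] then PySem.Chars.rstrip a else a ++ PySem.Chars.rstrip b := by
  simp only [PySem.Chars.rstrip, List.reverse_append, List.dropWhile_append]
  by_cases hb : (List.dropWhile PySem.Chars.isspace b.reverse).isEmpty = true
  · rw [if_pos hb]
    rw [List.isEmpty_iff] at hb
    rw [if_pos (by rw [hb]; rfl)]
  · rw [if_neg hb]
    rw [List.isEmpty_iff] at hb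
    rw [if_neg (by simp [hb])]
    rw [List.reverse_append, List.reverse_reverse]

theorem pv_lstrip_eq_self_of_strip (out : List Char) (h : PySem.Chars.strip out = out) :
    PySem.Chars.lstrip out = out := by
  have h1 : PySem.Chars.lstrip out <:+ out := List.dropWhile_suffix _
  apply h1.eq_of_length
  have h2 : (PySem.Chars.strip out).length ≤ (PySem.Chars.lstrip out).length := by
    simp only [PySem.Chars.strip, PySem.Chars.rstrip]
    calc (List.dropWhile PySem.Chars.isspace (PySem.Chars.lstrip out).reverse).reverse.length
        = (List.dropWhile PySem.Chars.isspace (PySem.Chars.lstrip out).reverse).length := by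
          rw [List.length_reverse]
      _ ≤ (PySem.Chars.lstrip out).reverse.length := List.length_dropWhile_le _ _
      _ = (PySem.Chars.lstrip out).length := List.length_reverse
  have h3 := h1.length_le
  rw [h] at h2
  omega

theorem pv_rstrip_eq_self_of_strip (out : List Char) (h : PySem.Chars.strip out = out) :
    PySem.Chars.rstrip out = out := by
  have hl := pv_lstrip_eq_self_of_strip out h
  calc PySem.Chars.rstrip out = PySem.Chars.rstrip (PySem.Chars.lstrip out) := by rw [hl]
    _ = out := h

theorem pv_dropWhile_idem {α : Type} (p : α → Bool) (l : List α) :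
    List.dropWhile p (List.dropWhile p l) = List.dropWhile p l := by
  induction l with
  | nil => rfl
  | cons a l ih =>
    by_cases hp : p a = true
    · rw [List.dropWhile_cons_of_pos hp, ih]
    · rw [List.dropWhile_cons_of_neg hp, List.dropWhile_cons_of_neg hp]

theorem pv_rstrip_idem (l : List Char) :
    PySem.Chars.rstrip (PySem.Chars.rstrip l) = PySem.Chars.rstrip l := by
  simp only [PySem.Chars.rstrip, List.reverse_reverse]
  rw [pv_dropWhile_idem]

theorem pv_rstrip_prefix (l : List Char) : PySem.Chars.rstrip l <+: l := by
  have h1 := List.dropWhile_suffix (l := l.reverse) PySem.Chars.isspace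
  have h2 := List.reverse_prefix.mpr h1
  rw [List.reverse_reverse] at h2
  simpa [PySem.Chars.rstrip] using h2

theorem pv_dropWhile_head_false {α : Type} (p : α → Bool) (l : List α) (c : α) (r : List α)
    (h : List.dropWhile p l = c :: r) : p c = false := by
  induction l with
  | nil => simp at h
  | cons a l ih =>
    by_cases hp : p a = true
    · rw [List.dropWhile_cons_of_pos hp] at h; exact ih h
    · rw [List.dropWhile_cons_of_neg hp] at h
      cases h
      simpa using hp

theorem pv_lstrip_strip (l : List Char) :
    PySem.Chars.lstrip (PySem.Chars.strip l) = PySem.Chars.strip l := by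
  simp only [PySem.Chars.strip]
  rcases hy : PySem.Chars.rstrip (PySem.Chars.lstrip l) with _ | ⟨c, ys⟩
  · rfl
  · have hpre : PySem.Chars.rstrip (PySem.Chars.lstrip l) <+: PySem.Chars.lstrip l :=
      pv_rstrip_prefix _
    rw [hy] at hpre
    obtain ⟨t, ht⟩ := hpre
    have hz : List.dropWhile PySem.Chars.isspace l = c :: (ys ++ t) := by
      simp only [PySem.Chars.lstrip] at ht
      rw [← ht]
      simp
    have hc : PySem.Chars.isspace c = false := pv_dropWhile_head_false _ _ _ _ hz
    simp only [PySem.Chars.lstrip]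
    rw [List.dropWhile_cons_of_neg (by simp [hc])]

theorem pv_strip_idem (l : List Char) :
    PySem.Chars.strip (PySem.Chars.strip l) = PySem.Chars.strip l := by
  conv_lhs => rw [PySem.Chars.strip, pv_lstrip_strip]
  rw [PySem.Chars.strip, pv_rstrip_idem]

theorem pv_lstrip_append_of_ne (out z : List Char) (h : PySem.Chars.lstrip out = out)
    (hne : out ≠ []) : PySem.Chars.lstrip (out ++ z) = out ++ z := by
  simp only [PySem.Chars.lstrip] at h ⊢
  rw [List.dropWhile_append, h, if_neg (by simp [hne])]

theorem pv_step (out p : List Char) (h : PySem.Chars.strip out = out) :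
    PySem.Chars.strip (out ++ ' ' :: p) = pvCombineB out p := by
  by_cases h0 : out = []
  · subst h0
    have hsp : PySem.Chars.strip (' ' :: p) = PySem.Chars.strip p := by
      simp only [PySem.Chars.strip, PySem.Chars.lstrip]
      rw [List.dropWhile_cons_of_pos (by decide)]
    have hc : pvCombineB [] p = PySem.Chars.strip p := by
      by_cases h1 : PySem.Chars.strip p = [] <;> simp [pvCombineB, h1]
    rw [List.nil_append, hsp, hc]
  · have hl := pv_lstrip_eq_self_of_strip out h
    have hr := pv_rstrip_eq_self_of_strip out h
    have hc : pvCombineB out p = if PySem.Chars.rstrip p = [] then out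
        else out ++ ' ' :: PySem.Chars.rstrip p := by
      by_cases hp : PySem.Chars.rstrip p = [] <;> simp [pvCombineB, h0, hp]
    rw [hc]
    have hls := pv_lstrip_append_of_ne out (' ' :: p) hl h0
    rw [PySem.Chars.strip, hls]
    rw [show out ++ ' ' :: p = out ++ ([' '] ++ p) from rfl]
    rw [pv_rstrip_append, pv_rstrip_append [' '] p]
    have hone : PySem.Chars.rstrip [' '] = [] := by decide
    rw [hone]
    by_cases hp : PySem.Chars.rstrip p = []
    · simp [hp, hr]
    · rw [if_neg hp, if_neg hp, if_neg (by simp)]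
      simp

theorem pv_strip_combine (out p : List Char) (h : PySem.Chars.strip out = out) :
    PySem.Chars.strip (pvCombineB out p) = pvCombineB out p := by
  by_cases h0 : out = []
  · subst h0
    have hc : pvCombineB [] p = PySem.Chars.strip p := by
      by_cases h1 : PySem.Chars.strip p = [] <;> simp [pvCombineB, h1]
    rw [hc]
    exact pv_strip_idem p
  · have hl := pv_lstrip_eq_self_of_strip out h
    have hc : pvCombineB out p = if PySem.Chars.rstrip p = [] then out
        else out ++ ' ' :: PySem.Chars.rstrip p := by
      by_cases hp : PySem.Chars.rstrip p = [] <;> simp [pvCombineB, h0, hp]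
    rw [hc]
    by_cases hp : PySem.Chars.rstrip p = []
    · rw [if_pos hp]; exact h
    · rw [if_neg hp]
      have hls := pv_lstrip_append_of_ne out (' ' :: PySem.Chars.rstrip p) hl h0
      rw [PySem.Chars.strip, hls]
      rw [show out ++ ' ' :: PySem.Chars.rstrip p
        = out ++ ([' '] ++ PySem.Chars.rstrip p) from rfl]
      rw [pv_rstrip_append, pv_rstrip_append [' '] (PySem.Chars.rstrip p)]
      rw [pv_rstrip_idem, if_neg hp, if_neg (by simp)]

theorem pv_fold (dict : PySem.Dict String String) (punct : List Char)
    (tokens : List (List Char)) (out : List Char) (h : PySem.Chars.strip out = out) :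
    tokens.foldl (fun out word_ =>
      let pe := pvPeelA punct word_ []
      let word := match dict.get? (String.mk (PySem.Chars.upper pe.1)) with
        | some v => '{' :: v.toList ++ ['}']
        | none => pe.1
      PySem.Chars.strip (out ++ ' ' :: (word ++ pe.2))) out
    = (tokens.map (pvPieceB dict (PySem.Set.ofList punct))).foldl pvCombineB out := by
  induction tokens generalizing out with
  | nil => rfl
  | cons w ts ih =>
    simp only [List.foldl_cons, List.map_cons]
    have hbody : PySem.Chars.strip (out ++ ' ' ::
        ((match dict.get? (String.mk (PySem.Chars.upper (pvPeelA punct w []).1)) with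
          | some v => '{' :: v.toList ++ ['}']
          | none => (pvPeelA punct w []).1) ++ (pvPeelA punct w []).2))
        = pvCombineB out (pvPieceB dict (PySem.Set.ofList punct) w) := by
      rw [pvPeelA_eq, pvPieceB]
      simp only [List.append_nil]
      exact pv_step out _ h
    rw [hbody]
    exact ih _ (pv_strip_combine out _ h)

-- ===== VERDICT (by name: the statement is the Claim_ definition above) =====
theorem ARPA_spec : Claim_equal_ARPA := by
  intro text thisdict punctuation EOS_Token _ _
  simp only [Spec_ARPA, ARPA, ARPA_alt]
  rw [pv_fold _ _ _ _ rfl]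
  split <;> rfl
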